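-- pv_equiv track=rewrite | github.com/remytuyeras/pedigrad-library | Pedigrad_py/PedigradCategory/cit.py | column_is_trivial
-- ===== SOURCE A (Python) =====
-- def column_is_trivial(column,exceptions):
--   #If the input list is not empty, the first element of the first input list
--   #that is not an element of the second input list must be different from
--   #another element in the list. The variable initiate will tell us if we
--   #have already found the first element of the input list that is not an
--   #element of the second input list.
--   initiate = False
--   #The variable flag is the answer to the question whether the first input list is
--   #trivial. The first input list is assumed to be trivial before checking (to
--   #handle the empty case).
--   flag = True
--   #The following loop the looks for the first element of the first input list
--   #that is not an element of the second input list. Then, when the variable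
--   #initiate is set to True, it checks whether this first element is different from
--   #any other element in the list.
--   for i in range(len(column)):
--     if initiate == False:
--       if not(column[i] in exceptions):
--         first = column[i]
--         initiate = True
--         continue
--     else:
--       #Checks whether this first element is different from
--       #any other element in the list.
--       if not(column[i] in exceptions) and first != column[i]:
--         flag = False
--         break
--   return flag
-- ===== SOURCE B (Python) =====
-- def column_is_trivial(column, exceptions):
--     exc = set(exceptions)
--     return len({x for x in column if x not in exc}) <= 1
-- ===== Notes on version B (the rewrite author's own statement) =====
-- stated objective: simpler
-- what changed: Replaces A's stateful scan (initiate/first/flag with break, comparing every later entry to the first) by a cardinality criterion: collect the distinct non-exception values into a set and return whether there are at most one; no 'first element' or pairwise comparison exists in B.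
import Mathlib
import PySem

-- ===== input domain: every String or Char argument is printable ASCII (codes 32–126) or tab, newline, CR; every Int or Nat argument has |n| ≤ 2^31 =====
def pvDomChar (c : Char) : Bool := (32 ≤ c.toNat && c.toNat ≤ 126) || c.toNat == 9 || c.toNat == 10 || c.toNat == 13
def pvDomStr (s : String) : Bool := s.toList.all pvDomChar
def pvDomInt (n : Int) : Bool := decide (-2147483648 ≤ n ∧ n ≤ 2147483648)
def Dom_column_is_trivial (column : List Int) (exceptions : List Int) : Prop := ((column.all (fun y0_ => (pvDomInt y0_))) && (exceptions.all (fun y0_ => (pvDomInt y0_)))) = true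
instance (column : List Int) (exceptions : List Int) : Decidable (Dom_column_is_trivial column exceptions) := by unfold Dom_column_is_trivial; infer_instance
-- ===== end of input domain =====

-- ===== PORT A =====
-- B replaces A's first-element comparison scan by a set-cardinality test (at most one distinct non-exception value); objective: simpler.
-- loop of A: state initiate/first/flag, with 'break' modeled as an early return of false
def citGo (exceptions : List Int) (initiate : Bool) (first : Int) : List Int → Bool
  | [] => true
  | x :: rest =>
    if initiate = false then
      if ¬ (x ∈ exceptions) then citGo exceptions true x rest
      else citGo exceptions false first rest
    else
      if ¬ (x ∈ exceptions) ∧ first ≠ x then false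
      else citGo exceptions initiate first rest

def column_is_trivial (column : List Int) (exceptions : List Int) : Bool :=
  citGo exceptions false 0 column

-- ===== PORT B =====
def column_is_trivial_alt (column : List Int) (exceptions : List Int) : Bool :=
  let exc := PySem.Set.ofList exceptions
  let distinct := PySem.Set.ofList (column.filter (fun x => decide (¬ (x ∈ exc))))
  decide (PySem.Set.len distinct ≤ 1)

-- ===== PRECONDITION & SPEC =====
def Spec_column_is_trivial (column : List Int) (exceptions : List Int) (out : Bool) : Prop := out = column_is_trivial_alt column exceptions
instance (column : List Int) (exceptions : List Int) (out : Bool) : Decidable (Spec_column_is_trivial column exceptions out) := by unfold Spec_column_is_trivial; infer_instance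

-- ===== CLAIM =====
def Claim_equal_column_is_trivial : Prop := ∀ (column : List Int) (exceptions : List Int), Dom_column_is_trivial column exceptions → Spec_column_is_trivial column exceptions (column_is_trivial column exceptions)

-- ===== LEMMAS AND PROOFS =====

-- a nodup list with one distinguished member f has length ≤ 1 iff every member is f
theorem ofList_cons_len_le_one (f : Int) (t : List Int) :
    ((PySem.Set.ofList (f :: t)).length ≤ 1) ↔ (∀ x ∈ t, x = f) := by
  constructor
  · intro h x hx
    have hf : f ∈ PySem.Set.ofList (f :: t) := by
      rw [PySem.Set.mem_ofList]; exact List.mem_cons_self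
    have hx' : x ∈ PySem.Set.ofList (f :: t) := by
      rw [PySem.Set.mem_ofList]; exact List.mem_cons_of_mem _ hx
    match hs : PySem.Set.ofList (f :: t) with
    | [] => rw [hs] at hf; simp at hf
    | [y] =>
      rw [hs] at hf hx'
      simp at hf hx'; omega
    | y :: z :: rest => rw [hs] at h; simp at h
  · intro h
    have hmem : ∀ x ∈ PySem.Set.ofList (f :: t), x = f := by
      intro x hx
      rw [PySem.Set.mem_ofList] at hx
      rcases List.mem_cons.mp hx with h1 | h2
      · exact h1
      · exact h x h2
    have hnd : (PySem.Set.ofList (f :: t)).Nodup := PySem.Set.nodup_ofList _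
    match hs : PySem.Set.ofList (f :: t) with
    | [] => simp
    | [y] => simp
    | y :: z :: rest =>
      exfalso
      rw [hs] at hmem hnd
      have hy := hmem y (by simp)
      have hz := hmem z (by simp)
      simp [hy, hz] at hnd

theorem any_ne_iff (f : Int) (t : List Int) :
    (! t.any (fun v => decide (v ≠ f))) = decide ((PySem.Set.ofList (f :: t)).length ≤ 1) := by
  rcases Decidable.em ((PySem.Set.ofList (f :: t)).length ≤ 1) with h | h
  · have := (ofList_cons_len_le_one f t).mp h
    simp [h, List.any_eq_false]
    intro x hx; exact this x hx
  · have : ¬ ∀ x ∈ t, x = f := fun hc => h ((ofList_cons_len_le_one f t).mpr hc)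
    push_neg at this
    obtain ⟨x, hx, hne⟩ := this
    simp [h, List.any_eq_true]
    exact ⟨x, hx, hne⟩

theorem citGo_true (exceptions : List Int) (f : Int) (rest : List Int) :
    citGo exceptions true f rest
      = ! (rest.filter (fun x => decide (¬ (x ∈ PySem.Set.ofList exceptions)))).any (fun v => decide (v ≠ f)) := by
  induction rest with
  | nil => simp [citGo]
  | cons x rest ih =>
    by_cases hx : x ∈ exceptions
    · simp [citGo, hx, ih, PySem.Set.mem_ofList]
    · by_cases hf : f = x
      · subst hf; simp [citGo, hx, ih, PySem.Set.mem_ofList]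
      · simp [citGo, hx, hf, PySem.Set.mem_ofList]
        exact fun h => absurd h.symm hf

theorem cit_eq (column : List Int) (exceptions : List Int) :
    column_is_trivial column exceptions = column_is_trivial_alt column exceptions := by
  unfold column_is_trivial column_is_trivial_alt
  simp only [PySem.Set.len, Nat.cast_le_one]
  induction column with
  | nil => simp [citGo]
  | cons x rest ih =>
    by_cases hx : x ∈ exceptions
    · simpa [citGo, hx, PySem.Set.mem_ofList] using ih
    · rw [show (x :: rest).filter (fun y => decide (¬ (y ∈ PySem.Set.ofList exceptions)))
            = x :: rest.filter (fun y => decide (¬ (y ∈ PySem.Set.ofList exceptions))) by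
          simp [PySem.Set.mem_ofList, hx]]
      rw [show citGo exceptions false 0 (x :: rest) = citGo exceptions true x rest by
          simp [citGo, hx]]
      rw [citGo_true, any_ne_iff]

-- ===== VERDICT =====
theorem column_is_trivial_spec : Claim_equal_column_is_trivial :=
  fun column exceptions _ => cit_eq column exceptions
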